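-- pv_equiv track=rewrite | github.com/LiamWoodRoberts/mimic_III_DS_eda | create_annotations.py | create_seqs
-- ===== SOURCE A (Python) =====
-- def create_seqs(word_ents):
--     '''Formats word entities as sequences'''
--     seqs = []
--     seq = []
--     for ents in word_ents:
--         if len(ents)>1:
--             seq.append(ents)
--         else:
--             seqs.append(seq)
--             seq=[]
--     return seqs
-- ===== SOURCE B (Python) =====
-- def create_seqs(word_ents):
--     '''Formats word entities as sequences'''
--     res = []
--     rest = word_ents
--     while True:
--         i = next((i for i, e in enumerate(rest) if len(e) <= 1), None)
--         if i is None: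
--             return res
--         res.append(rest[:i])
--         rest = rest[i+1:]
-- ===== Notes on version B (the rewrite author's own statement) =====
-- stated objective: alternative
-- what changed: Instead of A's single pass that accumulates the current group and flushes it at each separator, B repeatedly finds the first separator index in the remaining list, appends the slice before it, and continues after it; trailing elements after the last separator are dropped because no further separator is found.
import Mathlib
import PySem

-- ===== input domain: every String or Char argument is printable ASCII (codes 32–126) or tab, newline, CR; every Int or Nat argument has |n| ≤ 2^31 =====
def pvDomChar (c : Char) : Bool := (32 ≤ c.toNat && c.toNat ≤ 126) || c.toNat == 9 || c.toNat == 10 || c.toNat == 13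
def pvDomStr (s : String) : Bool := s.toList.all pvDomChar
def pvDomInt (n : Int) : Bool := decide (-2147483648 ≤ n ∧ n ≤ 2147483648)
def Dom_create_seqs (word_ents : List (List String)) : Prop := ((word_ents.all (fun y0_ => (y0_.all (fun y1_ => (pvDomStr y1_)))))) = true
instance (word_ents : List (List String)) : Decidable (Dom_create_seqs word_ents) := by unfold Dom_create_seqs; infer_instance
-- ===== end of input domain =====

-- B finds the first separator in the remaining list and slices before it, instead of A's
-- accumulate-and-flush single pass; an alternative decomposition, same results.


-- ===== PORT A =====
-- A: one pass, accumulating the current group `seq` and flushing it into `seqs` at each separator.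
def create_seqs (word_ents : List (List String)) : List (List (List String)) :=
  (word_ents.foldl
    (fun (st : List (List (List String)) × List (List String)) ents =>
      if ents.length > 1 then (st.1, st.2 ++ [ents]) else (st.1 ++ [st.2], []))
    ([], [])).1

-- ===== PORT B =====
-- B: repeatedly find the first separator index in the remaining list, append the slice before it,
-- and continue after it (the while loop of Source B becomes this recursion on `rest`).
def createSeqsAltGo (rest : List (List String)) (res : List (List (List String))) :
    List (List (List String)) :=
  match h : rest.findIdx? (fun e => e.length ≤ 1) with
  | none => res
  | some i => createSeqsAltGo (rest.drop (i + 1)) (res ++ [rest.take i])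
termination_by rest.length
decreasing_by
  cases rest with
  | nil => simp [List.findIdx?, List.findIdx?.go] at h
  | cons a t => simp

def create_seqs_alt (word_ents : List (List String)) : List (List (List String)) :=
  createSeqsAltGo word_ents []

-- ===== PRECONDITION & SPEC =====
def Spec_create_seqs (word_ents : List (List String)) (out : List (List (List String))) : Prop := out = create_seqs_alt word_ents
instance (word_ents : List (List String)) (out : List (List (List String))) : Decidable (Spec_create_seqs word_ents out) := by unfold Spec_create_seqs; infer_instance

-- ===== CLAIM (what is proved, stated in full; the proofs are below) =====
def Claim_equal_create_seqs : Prop := ∀ (word_ents : List (List String)), Dom_create_seqs word_ents → Spec_create_seqs word_ents (create_seqs word_ents)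

-- ===== LEMMAS AND PROOFS =====

-- proof-side helper: A's fold written as structural recursion on the list
def goA (rest : List (List String)) (cur : List (List String))
    (res : List (List (List String))) : List (List (List String)) :=
  match rest with
  | [] => res
  | e :: t => if e.length > 1 then goA t (cur ++ [e]) res else goA t [] (res ++ [cur])

lemma foldl_eq_goA (rest : List (List String)) (cur : List (List String))
    (res : List (List (List String))) :
    (rest.foldl
      (fun (st : List (List (List String)) × List (List String)) ents =>
        if ents.length > 1 then (st.1, st.2 ++ [ents]) else (st.1 ++ [st.2], []))
      (res, cur)).1 = goA rest cur res := by
  induction rest generalizing cur res with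
  | nil => rfl
  | cons e t ih =>
      simp only [List.foldl_cons, goA]
      by_cases hp : e.length > 1 <;> simp [hp, ih]

lemma createSeqsAltGo_unfold (rest : List (List String)) (res : List (List (List String))) :
    createSeqsAltGo rest res =
      match rest.findIdx? (fun e => e.length ≤ 1) with
      | none => res
      | some i => createSeqsAltGo (rest.drop (i + 1)) (res ++ [rest.take i]) := by
  rw [createSeqsAltGo]
  split <;> rename_i hf <;> simp [hf]

lemma goA_eq_find (rest : List (List String)) (cur : List (List String))
    (res : List (List (List String))) :
    goA rest cur res =
      match rest.findIdx? (fun e => e.length ≤ 1) with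
      | none => res
      | some i => createSeqsAltGo (rest.drop (i + 1)) (res ++ [cur ++ rest.take i]) := by
  induction rest generalizing cur res with
  | nil => rfl
  | cons e t ih =>
      by_cases hp : e.length > 1
      · have hq : ¬ (e.length ≤ 1) := by omega
        simp only [goA, if_pos hp, ih, List.findIdx?_cons, decide_eq_true_eq, hq]
        cases hf : t.findIdx? (fun e => e.length ≤ 1) with
        | none => simp
        | some j => simp [List.take_succ_cons, List.drop_succ_cons]
      · have hq : e.length ≤ 1 := by omega
        simp only [goA, if_neg hp, ih, List.findIdx?_cons, decide_eq_true_eq, if_pos hq]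
        rw [createSeqsAltGo_unfold]
        simp

-- ===== VERDICT (by name: the statement is the Claim_ definition above) =====
theorem create_seqs_spec : Claim_equal_create_seqs := by
  intro w _
  unfold Spec_create_seqs create_seqs create_seqs_alt
  rw [foldl_eq_goA, goA_eq_find, createSeqsAltGo_unfold]
  cases w.findIdx? (fun e => e.length ≤ 1) <;> simp
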